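-- pv_equiv track=rewrite | github.com/FreakyRafiki/Portfolio-Repository | Ramsey-in-Graph-Theory/utils.py | has_clique
-- ===== SOURCE A (Python) =====
-- def has_clique(vertices, coloring, color, size):
--     if size == 0:
--         return True
--     if len(vertices) < size:
--         return False
--     v = next(iter(vertices))
--     rest = vertices - {v}
--     color_neighbors = frozenset(
--         w for w in rest
--         if coloring.get(_edge(v, w)) == color
--     )
--     if has_clique(color_neighbors, coloring, color, size - 1):
--         return True
--     return has_clique(rest, coloring, color, size)
--
-- def _edge(u, v):
--     return (u, v) if u < v else (v, u)
-- ===== SOURCE B (Python) =====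
-- def _edge(u, v):
--     return (u, v) if u < v else (v, u)
--
-- def has_clique(vertices, coloring, color, size):
--     # Incremental pool of monochromatic cliques (as tuples), grown one vertex at a time.
--     cliques = [()]
--     for v in vertices:
--         new = []
--         for c in cliques:
--             if all(coloring.get(_edge(u, v)) == color for u in c):
--                 if len(c) + 1 == size:
--                     return True
--                 new.append(c + (v,))
--         cliques.extend(new)
--     return size == 0
-- ===== Notes on version B (the rewrite author's own statement) =====
-- stated objective: alternative
-- what changed: Replaces A's recursive include/exclude branching on a chosen vertex by a single iterative pass over the vertices that maintains the pool of all monochromatic cliques of size < k found so far, extending each by the new vertex and returning True as soon as one reaches the requested size.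
import Mathlib
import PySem

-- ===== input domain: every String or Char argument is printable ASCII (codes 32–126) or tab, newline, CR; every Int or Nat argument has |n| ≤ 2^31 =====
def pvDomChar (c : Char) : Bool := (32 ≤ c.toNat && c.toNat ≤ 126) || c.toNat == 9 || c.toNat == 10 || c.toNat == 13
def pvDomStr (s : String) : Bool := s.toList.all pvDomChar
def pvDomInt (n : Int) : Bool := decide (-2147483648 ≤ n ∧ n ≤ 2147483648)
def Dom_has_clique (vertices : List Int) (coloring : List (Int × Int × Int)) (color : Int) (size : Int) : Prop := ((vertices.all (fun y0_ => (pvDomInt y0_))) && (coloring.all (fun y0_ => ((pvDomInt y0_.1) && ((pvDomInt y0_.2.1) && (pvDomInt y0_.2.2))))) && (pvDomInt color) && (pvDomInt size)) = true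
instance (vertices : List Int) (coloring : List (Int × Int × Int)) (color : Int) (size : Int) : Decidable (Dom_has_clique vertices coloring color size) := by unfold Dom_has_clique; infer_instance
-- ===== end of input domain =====

-- ===== PORT A =====
-- B changes the recursive include/exclude search into an iterative pool of growing
-- monochromatic cliques (objective: alternative decomposition, same worst-case cost).

-- shared module helper: coloring.get(_edge(u, v)) — dict lookup = first matching key
def edgeGet (coloring : List (Int × Int × Int)) (u v : Int) : Option Int :=
  let a := if u < v then u else v
  let b := if u < v then v else u
  (coloring.find? (fun t => t.1 == a && t.2.1 == b)).map (fun t => t.2.2)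

def has_clique (vertices : List Int) (coloring : List (Int × Int × Int)) (color : Int) (size : Int) : Bool :=
  if size = 0 then true
  else if (vertices.length : Int) < size then false
  else
    match vertices with
    | [] => false   -- Python raises StopIteration here; unreachable under Pre_
    | v :: vs =>
      let rest := vs.filter (fun w => w != v)          -- vertices - {v}
      let colorNeighbors := rest.filter (fun w => edgeGet coloring v w == some color)
      if has_clique colorNeighbors coloring color (size - 1) then true
      else has_clique rest coloring color size
termination_by vertices.length
decreasing_by
  all_goals exact Nat.lt_succ_of_le (by simp; exact List.length_filter_le _ _)

-- ===== PORT B =====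
-- all(coloring.get(_edge(u, v)) == color for u in c)
def cliqueExtends (coloring : List (Int × Int × Int)) (color : Int) (v : Int) (c : List Int) : Bool :=
  c.all (fun u => edgeGet coloring u v == some color)

-- the inner 'for c in cliques' loop; none = the early 'return True' fired
def innerScan (coloring : List (Int × Int × Int)) (color : Int) (size : Int) (v : Int) :
    List (List Int) → List (List Int) → Option (List (List Int))
  | [], new => some new
  | c :: cs, new =>
    if cliqueExtends coloring color v c then
      if ((c.length : Int) + 1) = size then none
      else innerScan coloring color size v cs (new ++ [c ++ [v]])
    else innerScan coloring color size v cs new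

-- the outer 'for v in vertices' loop
def outerLoop (coloring : List (Int × Int × Int)) (color : Int) (size : Int) :
    List Int → List (List Int) → Bool
  | [], _ => size == 0
  | v :: rem, cliques =>
    match innerScan coloring color size v cliques [] with
    | none => true
    | some new => outerLoop coloring color size rem (cliques ++ new)

def has_clique_alt (vertices : List Int) (coloring : List (Int × Int × Int)) (color : Int) (size : Int) : Bool :=
  outerLoop coloring color size vertices [[]]

-- ===== PRECONDITION & SPEC =====
-- Pre_ requires 0 ≤ size (a negative size makes the Python A recurse down to the empty
-- set and raise StopIteration) and vertices.Nodup (vertices is a Python set, so its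
-- List model holds distinct elements by the type convention).
def Pre_has_clique (vertices : List Int) (coloring : List (Int × Int × Int)) (color : Int) (size : Int) : Prop :=
  0 ≤ size ∧ vertices.Nodup
instance (vertices : List Int) (coloring : List (Int × Int × Int)) (color : Int) (size : Int) : Decidable (Pre_has_clique vertices coloring color size) := by unfold Pre_has_clique; infer_instance

def pvWitness_has_clique : List Int × (List (Int × Int × Int)) × Int × Int :=
  ([1, 2, 3], [(1, 2, 0), (1, 3, 0), (2, 3, 0)], 0, 3)

def Spec_has_clique (vertices : List Int) (coloring : List (Int × Int × Int)) (color : Int) (size : Int) (out : Bool) : Prop := out = has_clique_alt vertices coloring color size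
instance (vertices : List Int) (coloring : List (Int × Int × Int)) (color : Int) (size : Int) (out : Bool) : Decidable (Spec_has_clique vertices coloring color size out) := by unfold Spec_has_clique; infer_instance

-- ===== CLAIM (what is proved, stated in full; the proofs are below) =====
def Claim_equal_has_clique : Prop := ∀ (vertices : List Int) (coloring : List (Int × Int × Int)) (color : Int) (size : Int), Dom_has_clique vertices coloring color size → Pre_has_clique vertices coloring color size → Spec_has_clique vertices coloring color size (has_clique vertices coloring color size)

-- ===== LEMMAS AND PROOFS =====

-- a monochromatic clique, listed in the ambient vertex order
def Mono (coloring : List (Int × Int × Int)) (color : Int) (t : List Int) : Prop :=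
  t.Pairwise (fun u w => edgeGet coloring u w = some color)

theorem sublist_concat_iff {α : Type} {t l : List α} {a : α} :
    List.Sublist t (l ++ [a]) ↔ List.Sublist t l ∨ ∃ r, t = r ++ [a] ∧ List.Sublist r l := by
  rw [List.sublist_append_iff]
  constructor
  · rintro ⟨l₁, l₂, rfl, h1, h2⟩
    rcases List.sublist_cons_iff.mp h2 with h | ⟨r, rfl, hr⟩
    · rw [List.sublist_nil.mp h]
      left; simpa using h1
    · rw [List.sublist_nil.mp hr]
      right; exact ⟨l₁, rfl, h1⟩
  · rintro (h | ⟨r, rfl, hr⟩)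
    · exact ⟨t, [], by simp, h, List.nil_sublist _⟩
    · exact ⟨r, [a], rfl, hr, List.Sublist.refl _⟩

theorem sublist_filter' {α : Type} {t l : List α} {p : α → Bool} :
    List.Sublist t (l.filter p) ↔ List.Sublist t l ∧ ∀ x ∈ t, p x = true := by
  constructor
  · intro h
    exact ⟨h.trans List.filter_sublist, fun x hx => List.of_mem_filter (h.subset hx)⟩
  · rintro ⟨h, hall⟩
    have := h.filter p
    rwa [List.filter_eq_self.mpr hall] at this

theorem hasClique_iff_aux (coloring : List (Int × Int × Int)) (color : Int) (n : ℕ) :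
    ∀ (vertices : List Int) (size : Int), vertices.length ≤ n → vertices.Nodup → 0 ≤ size →
    (has_clique vertices coloring color size = true ↔
      ∃ t, List.Sublist t vertices ∧ Mono coloring color t ∧ (t.length : Int) = size) := by
  induction n with
  | zero =>
    intro vertices size hlen _ hsz
    have hv : vertices = [] := List.eq_nil_of_length_eq_zero (Nat.le_zero.mp hlen)
    subst hv
    rw [has_clique.eq_def]
    by_cases h0 : size = 0
    · subst h0
      rw [if_pos rfl]
      simp only [true_iff]
      exact ⟨[], List.nil_sublist _, List.Pairwise.nil, rfl⟩
    · have hpos : (0 : Int) < size := by omega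
      rw [if_neg h0, if_pos (by simpa using hpos)]
      constructor
      · intro h; exact absurd h (by simp)
      · rintro ⟨t, ht, _, hl⟩
        rw [List.sublist_nil.mp ht] at hl
        omega
  | succ n ih =>
    intro vertices size hlen hnd hsz
    by_cases h0 : size = 0
    · subst h0
      rw [has_clique.eq_def, if_pos rfl]
      simp only [true_iff]
      exact ⟨[], List.nil_sublist _, List.Pairwise.nil, rfl⟩
    · by_cases hsmall : (vertices.length : Int) < size
      · rw [has_clique.eq_def, if_neg h0, if_pos hsmall]
        constructor
        · intro h; exact absurd h (by simp)
        · rintro ⟨t, ht, _, hl⟩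
          have := ht.length_le
          omega
      · match vertices, hnd with
        | [], _ => simp at hsmall; omega
        | v :: vs, hnd =>
          have hv : v ∉ vs := (List.nodup_cons.mp hnd).1
          have hndvs : vs.Nodup := (List.nodup_cons.mp hnd).2
          have hrest : vs.filter (fun w => w != v) = vs := by
            apply List.filter_eq_self.mpr
            intro w hw
            simp only [bne_iff_ne, ne_eq]
            rintro rfl; exact hv hw
          rw [has_clique.eq_def, if_neg h0, if_neg hsmall]
          simp only [hrest]
          rw [show (if has_clique (List.filter (fun w => edgeGet coloring v w == some color) vs) coloring color (size - 1) = true then true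
              else has_clique vs coloring color size)
            = (has_clique (List.filter (fun w => edgeGet coloring v w == some color) vs) coloring color (size - 1)
               || has_clique vs coloring color size) from by
            cases h : has_clique (List.filter (fun w => edgeGet coloring v w == some color) vs) coloring color (size - 1) <;> simp]
          rw [Bool.or_eq_true]
          have hcnnd : (vs.filter (fun w => edgeGet coloring v w == some color)).Nodup :=
            hndvs.filter _
          have hcnlen : (vs.filter (fun w => edgeGet coloring v w == some color)).length ≤ n := by
            have := List.length_filter_le (fun w => edgeGet coloring v w == some color) vs
            simp at hlen; omega
          have hvslen : vs.length ≤ n := by simp at hlen; omega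
          have ih1 := ih (vs.filter (fun w => edgeGet coloring v w == some color)) (size - 1)
            hcnlen hcnnd (by omega)
          have ih2 := ih vs size hvslen hndvs hsz
          constructor
          · rintro (hA | hB)
            · rcases ih1.mp hA with ⟨t, ht, hm, hl⟩
              rcases sublist_filter'.mp ht with ⟨htvs, hall⟩
              refine ⟨v :: t, List.cons_sublist_cons.mpr htvs, ?_, by simp; omega⟩
              unfold Mono at hm ⊢
              rw [List.pairwise_cons]
              exact ⟨fun u hu => by have := hall u hu; simpa [beq_iff_eq] using this, hm⟩
            · rcases ih2.mp hB with ⟨t, ht, hm, hl⟩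
              exact ⟨t, ht.trans (List.sublist_cons_self v vs), hm, hl⟩
          · rintro ⟨t, ht, hm, hl⟩
            rcases List.sublist_cons_iff.mp ht with h | ⟨r, rfl, hr⟩
            · exact Or.inr (ih2.mpr ⟨t, h, hm, hl⟩)
            · have hmr : Mono coloring color r := (List.pairwise_cons.mp hm).2
              have hcolored : ∀ u ∈ r, edgeGet coloring v u = some color :=
                (List.pairwise_cons.mp hm).1
              have hrcn : List.Sublist r (vs.filter (fun w => edgeGet coloring v w == some color)) :=
                sublist_filter'.mpr ⟨hr, fun x hx => by simp [beq_iff_eq]; exact hcolored x hx⟩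
              refine Or.inl (ih1.mpr ⟨r, hrcn, hmr, ?_⟩)
              simp at hl; omega

theorem hasClique_iff (vertices : List Int) (coloring : List (Int × Int × Int)) (color : Int) (size : Int)
    (hnd : vertices.Nodup) (hsz : 0 ≤ size) :
    has_clique vertices coloring color size = true ↔
      ∃ t, List.Sublist t vertices ∧ Mono coloring color t ∧ (t.length : Int) = size :=
  hasClique_iff_aux coloring color vertices.length vertices size (le_refl _) hnd hsz

theorem innerScan_eq (coloring : List (Int × Int × Int)) (color : Int) (size : Int) (v : Int)
    (cs acc : List (List Int)) :
    innerScan coloring color size v cs acc =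
      if ∃ c ∈ cs, cliqueExtends coloring color v c = true ∧ (c.length : Int) + 1 = size then none
      else some (acc ++ (cs.filter (cliqueExtends coloring color v)).map (fun c => c ++ [v])) := by
  induction cs generalizing acc with
  | nil => simp [innerScan]
  | cons c cs ih =>
    rw [innerScan]
    by_cases hext : cliqueExtends coloring color v c = true
    · by_cases hlen : ((c.length : Int) + 1) = size
      · simp [hext, hlen]
      · rw [if_pos hext, if_neg hlen, ih]
        by_cases htr : ∃ c' ∈ cs, cliqueExtends coloring color v c' = true ∧ (c'.length : Int) + 1 = size
        · rw [if_pos htr, if_pos]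
          rcases htr with ⟨c', hc', h1, h2⟩
          exact ⟨c', List.mem_cons_of_mem _ hc', h1, h2⟩
        · rw [if_neg htr, if_neg, List.filter_cons_of_pos hext]
          · simp
          · rintro ⟨c', hc', h1, h2⟩
            rcases List.mem_cons.mp hc' with rfl | hmem
            · exact hlen h2
            · exact htr ⟨c', hmem, h1, h2⟩
    · rw [if_neg hext, ih]
      by_cases htr : ∃ c' ∈ cs, cliqueExtends coloring color v c' = true ∧ (c'.length : Int) + 1 = size
      · rw [if_pos htr, if_pos]
        rcases htr with ⟨c', hc', h1, h2⟩
        exact ⟨c', List.mem_cons_of_mem _ hc', h1, h2⟩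
      · rw [if_neg htr, if_neg, List.filter_cons_of_neg (by simpa using hext)]
        rintro ⟨c', hc', h1, h2⟩
        rcases List.mem_cons.mp hc' with rfl | hmem
        · exact hext h1
        · exact htr ⟨c', hmem, h1, h2⟩

theorem outerLoop_sz_zero (coloring : List (Int × Int × Int)) (color : Int)
    (rem : List Int) (cliques : List (List Int)) :
    outerLoop coloring color 0 rem cliques = true := by
  induction rem generalizing cliques with
  | nil => simp [outerLoop]
  | cons v rem ih =>
    rw [outerLoop, innerScan_eq, if_neg]
    · exact ih _
    · rintro ⟨c, _, _, h⟩
      omega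

theorem outerLoop_iff (coloring : List (Int × Int × Int)) (color : Int) (size : Int)
    (hsz : size ≠ 0) :
    ∀ (rem P : List Int) (cliques : List (List Int)),
    (∀ t, t ∈ cliques ↔ (List.Sublist t P ∧ Mono coloring color t ∧ (t.length : Int) < size)) →
    (¬ ∃ t, List.Sublist t P ∧ Mono coloring color t ∧ (t.length : Int) = size) →
    (outerLoop coloring color size rem cliques = true ↔
      ∃ t, List.Sublist t (P ++ rem) ∧ Mono coloring color t ∧ (t.length : Int) = size) := by
  intro rem
  induction rem with
  | nil =>
    intro P cliques _ hno
    rw [outerLoop]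
    simp only [List.append_nil]
    constructor
    · intro h; exact absurd (by simpa using h) hsz
    · intro h; exact absurd h hno
  | cons v rem ih =>
    intro P cliques hinv hno
    rw [outerLoop, innerScan_eq]
    by_cases htr : ∃ c ∈ cliques, cliqueExtends coloring color v c = true ∧ (c.length : Int) + 1 = size
    · rw [if_pos htr]
      simp only [true_iff]
      rcases htr with ⟨c, hc, hext, hlen⟩
      rcases (hinv c).mp hc with ⟨hcP, hcm, _⟩
      refine ⟨c ++ [v], ?_, ?_, by simp; omega⟩
      · exact List.Sublist.append hcP (List.cons_sublist_cons.mpr (List.nil_sublist rem))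
      · unfold Mono at hcm ⊢
        rw [List.pairwise_append]
        refine ⟨hcm, List.pairwise_singleton _ _, ?_⟩
        intro a ha b hb
        rw [List.mem_singleton.mp hb]
        have := List.all_eq_true.mp hext a ha
        simpa [beq_iff_eq] using this
    · rw [if_neg htr]
      simp only [List.nil_append]
      have hno' : ¬ ∃ t, List.Sublist t (P ++ [v]) ∧ Mono coloring color t ∧ (t.length : Int) = size := by
        rintro ⟨t, ht, hm, hl⟩
        rcases sublist_concat_iff.mp ht with h | ⟨r, rfl, hr⟩
        · exact hno ⟨t, h, hm, hl⟩
        · unfold Mono at hm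
          rw [List.pairwise_append] at hm
          rcases hm with ⟨hmr, _, hrel⟩
          have hrlen : (r.length : Int) + 1 = size := by simp at hl; omega
          have hrmem : r ∈ cliques := (hinv r).mpr ⟨hr, hmr, by omega⟩
          apply htr
          refine ⟨r, hrmem, ?_, hrlen⟩
          rw [cliqueExtends, List.all_eq_true]
          intro u hu
          simpa [beq_iff_eq] using hrel u hu v (List.mem_singleton_self v)
      have hinv' : ∀ t, t ∈ cliques ++ (cliques.filter (cliqueExtends coloring color v)).map (fun c => c ++ [v]) ↔
          (List.Sublist t (P ++ [v]) ∧ Mono coloring color t ∧ (t.length : Int) < size) := by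
        intro t
        rw [List.mem_append]
        constructor
        · rintro (h | h)
          · rcases (hinv t).mp h with ⟨h1, h2, h3⟩
            exact ⟨h1.trans (List.sublist_append_left _ _), h2, h3⟩
          · rcases List.mem_map.mp h with ⟨c, hcmem, rfl⟩
            rcases List.mem_filter.mp hcmem with ⟨hcmem, hext⟩
            rcases (hinv c).mp hcmem with ⟨h1, h2, h3⟩
            have hne : (c.length : Int) + 1 ≠ size := by
              intro heq; exact htr ⟨c, hcmem, hext, heq⟩
            refine ⟨List.Sublist.append h1 (List.Sublist.refl _), ?_, by simp; omega⟩
            unfold Mono at h2 ⊢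
            rw [List.pairwise_append]
            refine ⟨h2, List.pairwise_singleton _ _, ?_⟩
            intro a ha b hb
            rw [List.mem_singleton.mp hb]
            simpa [beq_iff_eq] using List.all_eq_true.mp hext a ha
        · rintro ⟨h1, h2, h3⟩
          rcases sublist_concat_iff.mp h1 with h | ⟨r, rfl, hr⟩
          · exact Or.inl ((hinv t).mpr ⟨h, h2, h3⟩)
          · right
            unfold Mono at h2
            rw [List.pairwise_append] at h2
            rcases h2 with ⟨hmr, _, hrel⟩
            have hrmem : r ∈ cliques := (hinv r).mpr ⟨hr, hmr, by simp at h3; omega⟩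
            have hext : cliqueExtends coloring color v r = true := by
              rw [cliqueExtends, List.all_eq_true]
              intro u hu
              simpa [beq_iff_eq] using hrel u hu v (List.mem_singleton_self v)
            exact List.mem_map.mpr ⟨r, List.mem_filter.mpr ⟨hrmem, hext⟩, rfl⟩
      rw [ih (P ++ [v]) _ hinv' hno']
      constructor
      · rintro ⟨t, ht, hm, hl⟩
        refine ⟨t, ?_, hm, hl⟩
        rwa [List.append_assoc, List.singleton_append] at ht
      · rintro ⟨t, ht, hm, hl⟩
        refine ⟨t, ?_, hm, hl⟩
        rwa [List.append_assoc, List.singleton_append]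

theorem altClique_iff (vertices : List Int) (coloring : List (Int × Int × Int)) (color : Int) (size : Int)
    (hsz : 0 ≤ size) :
    has_clique_alt vertices coloring color size = true ↔
      ∃ t, List.Sublist t vertices ∧ Mono coloring color t ∧ (t.length : Int) = size := by
  rw [has_clique_alt]
  by_cases h0 : size = 0
  · subst h0
    rw [outerLoop_sz_zero]
    simp only [true_iff]
    exact ⟨[], List.nil_sublist _, List.Pairwise.nil, rfl⟩
  · have hinv : ∀ t, t ∈ ([[]] : List (List Int)) ↔
        (List.Sublist t ([] : List Int) ∧ Mono coloring color t ∧ (t.length : Int) < size) := by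
      intro t
      simp only [List.mem_singleton, List.sublist_nil]
      constructor
      · rintro rfl
        exact ⟨rfl, List.Pairwise.nil, by simp; omega⟩
      · rintro ⟨rfl, _, _⟩; rfl
    have hno : ¬ ∃ t, List.Sublist t ([] : List Int) ∧ Mono coloring color t ∧ (t.length : Int) = size := by
      rintro ⟨t, ht, _, hl⟩
      rw [List.sublist_nil.mp ht] at hl
      simp at hl; omega
    have := outerLoop_iff coloring color size h0 vertices [] [[]] hinv hno
    rwa [List.nil_append] at this

-- ===== VERDICT (by name: the statement is the Claim_ definition above) =====
theorem has_clique_spec : Claim_equal_has_clique := by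
  intro vertices coloring color size _ hpre
  unfold Spec_has_clique
  rcases hpre with ⟨hsz, hnd⟩
  have h1 := hasClique_iff vertices coloring color size hnd hsz
  have h2 := altClique_iff vertices coloring color size hsz
  exact Bool.eq_iff_iff.mpr (h1.trans h2.symm)
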